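-- pv_equiv track=rewrite | github.com/HamiGames/Lucid | infrastructure/containers/inject_dockerfile_x_files_skeleton.py | filter_listing_dirs_by_copy_approval
-- ===== SOURCE A (Python) =====
-- def filter_listing_dirs_by_copy_approval(
--     listing_dirs: list[str],
--     approved: frozenset[str],
-- ) -> list[str]:
--     """Keep listing dirs that sit under at least one approved ``./`` prefix (always keep ``.``)."""
--     if not approved:
--         return ["."]
--     out: list[str] = []
--     for d in listing_dirs:
--         if d == ".":
--             out.append(d)
--             continue
--         norm_d = d.rstrip("/")
--         ok = False
--         for a in approved:
--             if a == ".":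
--                 ok = True
--                 break
--             na = a.rstrip("/")
--             if norm_d == na or norm_d.startswith(na + "/"):
--                 ok = True
--                 break
--         if ok:
--             out.append(d)
--     return sorted(set(out), key=lambda s: (s.count("/"), s))
-- ===== SOURCE B (Python) =====
-- def filter_listing_dirs_by_copy_approval(
--     listing_dirs: list[str],
--     approved: frozenset[str],
-- ) -> list[str]:
--     """Keep listing dirs that sit under at least one approved ``./`` prefix (always keep ``.``)."""
--     if not approved:
--         return ["."]
--     if "." in approved:
--         kept = set(listing_dirs)
--     else:
--         prefixes = {a.rstrip("/") for a in approved}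
--         kept = set()
--         for d in listing_dirs:
--             if d == ".":
--                 kept.add(d)
--                 continue
--             nd = d.rstrip("/")
--             ancestors = {nd[:j] for j in range(len(nd)) if nd[j] == "/"}
--             ancestors.add(nd)
--             if not ancestors.isdisjoint(prefixes):
--                 kept.add(d)
--     return sorted(kept, key=lambda s: (s.count("/"), s))
-- ===== Notes on version B (the rewrite author's own statement) =====
-- stated objective: faster
-- what changed: Instead of scanning every approved entry per directory with startswith tests, B pre-builds a hash set of rstripped approved prefixes once and, per directory, enumerates the directory's own ancestor prefixes (cut at each '/') and intersects them with that set, so the inner scan over approved disappears; an approved '.' short-circuits to keeping every directory.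
import Mathlib
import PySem

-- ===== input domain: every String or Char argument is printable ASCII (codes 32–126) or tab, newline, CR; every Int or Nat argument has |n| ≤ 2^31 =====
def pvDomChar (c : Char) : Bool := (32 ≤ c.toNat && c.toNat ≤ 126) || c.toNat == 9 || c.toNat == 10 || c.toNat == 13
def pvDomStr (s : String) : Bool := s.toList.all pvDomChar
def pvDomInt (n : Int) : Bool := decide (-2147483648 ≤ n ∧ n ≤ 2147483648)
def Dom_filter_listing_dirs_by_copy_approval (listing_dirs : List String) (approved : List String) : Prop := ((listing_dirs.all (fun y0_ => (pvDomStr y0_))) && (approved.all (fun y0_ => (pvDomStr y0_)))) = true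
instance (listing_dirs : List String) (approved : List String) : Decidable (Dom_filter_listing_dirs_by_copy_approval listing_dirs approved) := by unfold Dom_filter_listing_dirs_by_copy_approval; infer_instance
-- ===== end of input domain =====

-- B replaces A's per-directory scan over `approved` (startswith tests) by a precomputed set of
-- rstripped approved prefixes intersected with the directory's own ancestor prefixes (objective: faster; measured).

-- s.rstrip("/") on code points (exact: drops trailing '/' characters only; no PySem one-sided
-- strip-with-chars primitive exists, so it is ported by hand)
def pvRstripSlash (cs : List Char) : List Char := (cs.reverse.dropWhile (· == '/')).reverse

-- ===== PORT A =====
-- the inner `for a in approved: … break` loop of A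
def pvOkLoop (nd : List Char) : List String → Bool
  | [] => false
  | a :: rest =>
    if a = "." then true
    else
      let na := pvRstripSlash a.toList
      if nd = na || PySem.Chars.startswith nd (na ++ ['/']) then true
      else pvOkLoop nd rest

def filter_listing_dirs_by_copy_approval (listing_dirs : List String) (approved : List String) : List String :=
  if approved = [] then ["."]
  else
    let out : List String := listing_dirs.foldl (fun out d =>
      if d = "." then out ++ [d]
      else
        let norm_d := pvRstripSlash d.toList
        if pvOkLoop norm_d approved then out ++ [d] else out) []
    PySem.List.sorted2 (PySem.Set.ofList out) (fun s => PySem.Str.count s "/") (fun s => s) false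

-- ===== PORT B =====
-- the ancestor-prefix set {nd[:j] for j in range(len(nd)) if nd[j] == "/"} (j < len(nd), so getD is exact)
def pvAncestors (nd : List Char) : PySem.Set (List Char) :=
  PySem.Set.add
    (PySem.Set.ofList ((List.range nd.length).filterMap
      (fun j => if nd.getD j ' ' = '/' then some (nd.take j) else none)))
    nd

def filter_listing_dirs_by_copy_approval_alt (listing_dirs : List String) (approved : List String) : List String :=
  if approved = [] then ["."]
  else
    let kept : PySem.Set String :=
      if approved.contains "." then PySem.Set.ofList listing_dirs
      else
        let prefixes : PySem.Set (List Char) :=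
          PySem.Set.ofList (approved.map (fun a => pvRstripSlash a.toList))
        listing_dirs.foldl (fun kept d =>
          if d = "." then PySem.Set.add kept d
          else
            let nd := pvRstripSlash d.toList
            if !(PySem.Set.isdisjoint (pvAncestors nd) prefixes) then PySem.Set.add kept d
            else kept) []
    PySem.List.sorted2 kept (fun s => PySem.Str.count s "/") (fun s => s) false

-- ===== PRECONDITION & SPEC =====
def Spec_filter_listing_dirs_by_copy_approval (listing_dirs : List String) (approved : List String) (out : List String) : Prop := out = filter_listing_dirs_by_copy_approval_alt listing_dirs approved
instance (listing_dirs : List String) (approved : List String) (out : List String) : Decidable (Spec_filter_listing_dirs_by_copy_approval listing_dirs approved out) := by unfold Spec_filter_listing_dirs_by_copy_approval; infer_instance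

-- ===== CLAIM (what is proved, stated in full; the proofs are below) =====
def Claim_equal_filter_listing_dirs_by_copy_approval : Prop := ∀ (listing_dirs : List String) (approved : List String), Dom_filter_listing_dirs_by_copy_approval listing_dirs approved → Spec_filter_listing_dirs_by_copy_approval listing_dirs approved (filter_listing_dirs_by_copy_approval listing_dirs approved)

-- ===== LEMMAS AND PROOFS =====

-- membership in the ancestor set
theorem mem_pvAncestors (nd x : List Char) :
    x ∈ pvAncestors nd ↔ (∃ j < nd.length, nd.getD j ' ' = '/' ∧ nd.take j = x) ∨ x = nd := by
  unfold pvAncestors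
  rw [PySem.Set.mem_add, PySem.Set.mem_ofList]
  simp only [List.mem_filterMap, List.mem_range, List.getD_eq_getElem?_getD]
  constructor
  · rintro (⟨j, hj, h⟩ | h)
    · left; refine ⟨j, hj, ?_⟩
      by_cases hc : nd[j]?.getD ' ' = '/'
      · simpa [hc] using h
      · simp [hc] at h
    · right; exact h
  · rintro (⟨j, hj, hc, ht⟩ | h)
    · left; exact ⟨j, hj, by simp [hc, ht]⟩
    · right; exact h

-- the key string fact: "nd == na or nd.startswith(na + '/')" says exactly that na is nd or an
-- ancestor prefix of nd (cut at a '/')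
theorem match_iff_mem_ancestors (nd na : List Char) :
    (nd = na ∨ PySem.Chars.startswith nd (na ++ ['/']) = true) ↔ na ∈ pvAncestors nd := by
  rw [mem_pvAncestors, PySem.Chars.startswith_iff]
  constructor
  · rintro (h | ⟨t, ht⟩)
    · right; exact h.symm
    · left
      subst ht
      refine ⟨na.length, by simp, ?_, by simp⟩
      simp [List.getD_eq_getElem?_getD]
  · rintro (⟨j, hj, hc, ht⟩ | h)
    · right
      refine ⟨nd.drop (j + 1), ?_⟩
      have h1 : nd.take (j + 1) = na ++ ['/'] := by
        rw [List.take_add_one, ht]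
        have : nd[j]? = some '/' := by
          rw [List.getElem?_eq_getElem hj]
          simpa [List.getD_eq_getElem?_getD, List.getElem?_eq_getElem hj] using hc
        simp [this]
      have h2 : nd.take (j + 1) ++ nd.drop (j + 1) = nd := List.take_append_drop _ _
      rw [h1] at h2
      simpa using h2
    · left; exact h.symm

-- when "." is approved, A's inner loop always succeeds
theorem pvOkLoop_of_mem_dot (nd : List Char) (as : List String) (h : "." ∈ as) :
    pvOkLoop nd as = true := by
  induction as with
  | nil => simp at h
  | cons a rest ih =>
    by_cases ha : a = "."
    · simp [pvOkLoop, ha]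
    · have hr : "." ∈ rest := by
        rcases List.mem_cons.mp h with h' | h'
        · exact absurd h'.symm ha
        · exact h'
      simp only [pvOkLoop, if_neg ha]
      split
      · rfl
      · exact ih hr

-- when "." is not approved, A's inner loop is exactly B's ancestor/prefix-set test
theorem pvOkLoop_eq_any (nd : List Char) (as : List String) (h : "." ∉ as) :
    pvOkLoop nd as = true ↔ ∃ a ∈ as, pvRstripSlash a.toList ∈ pvAncestors nd := by
  induction as with
  | nil => simp [pvOkLoop]
  | cons a rest ih =>
    have ha : a ≠ "." := fun he => h (by simp [he])
    have hrest : "." ∉ rest := fun he => h (by simp [he])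
    simp only [pvOkLoop, if_neg ha]
    by_cases hm : nd = pvRstripSlash a.toList ∨
        PySem.Chars.startswith nd (pvRstripSlash a.toList ++ ['/']) = true
    · have hb : (nd = pvRstripSlash a.toList ||
          PySem.Chars.startswith nd (pvRstripSlash a.toList ++ ['/'])) = true := by
        rcases hm with h1 | h1 <;> simp [h1]
      rw [hb]
      constructor
      · intro _; exact ⟨a, by simp, (match_iff_mem_ancestors nd _).mp hm⟩
      · intro _; simp
    · have hb : (nd = pvRstripSlash a.toList ||
          PySem.Chars.startswith nd (pvRstripSlash a.toList ++ ['/'])) = false := by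
        rw [not_or] at hm
        simp [hm.1, hm.2]
      rw [hb]
      simp only [Bool.false_eq_true, if_false]
      rw [ih hrest]
      constructor
      · rintro ⟨x, hx, hm'⟩; exact ⟨x, by simp [hx], hm'⟩
      · rintro ⟨x, hx, hm'⟩
        rcases List.mem_cons.mp hx with rfl | hx'
        · exact absurd ((match_iff_mem_ancestors nd _).mpr hm') hm
        · exact ⟨x, hx', hm'⟩

-- B's per-directory test, as a proposition
theorem pv_isdisjoint_iff (nd : List Char) (prefixes : PySem.Set (List Char)) :
    (!(PySem.Set.isdisjoint (pvAncestors nd) prefixes)) = true ↔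
      ∃ x ∈ pvAncestors nd, x ∈ prefixes := by
  rw [Bool.not_eq_true', ← Bool.not_eq_true, PySem.Set.isdisjoint_iff]
  simp


theorem filter_listing_dirs_by_copy_approval_spec : Claim_equal_filter_listing_dirs_by_copy_approval := by
  intro l as _hd
  unfold Spec_filter_listing_dirs_by_copy_approval
  unfold filter_listing_dirs_by_copy_approval filter_listing_dirs_by_copy_approval_alt
  by_cases hnil : as = []
  · simp [hnil]
  · simp only [if_neg hnil]
    have hA : (l.foldl (fun out d =>
        if d = "." then out ++ [d]
        else
          let norm_d := pvRstripSlash d.toList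
          if pvOkLoop norm_d as then out ++ [d] else out) ([] : List String))
        = l.filter (fun d => d == "." || pvOkLoop (pvRstripSlash d.toList) as) := by
      have hstep : (fun (out : List String) (d : String) =>
          if d = "." then out ++ [d]
          else
            let norm_d := pvRstripSlash d.toList
            if pvOkLoop norm_d as then out ++ [d] else out)
          = (fun out d => if (d == "." || pvOkLoop (pvRstripSlash d.toList) as) = true
              then out ++ [id d] else out) := by
        funext out d
        by_cases hd : d = "." <;> simp [hd]
      rw [hstep, PySem.List.foldl_append_if]
      simp
    rw [hA]
    by_cases hdot : as.contains "."
    · have hmem : "." ∈ as := by simpa using hdot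
      rw [if_pos hdot]
      have hall : l.filter (fun d => d == "." || pvOkLoop (pvRstripSlash d.toList) as) = l := by
        apply List.filter_eq_self.mpr
        intro d _
        simp [pvOkLoop_of_mem_dot _ _ hmem]
      rw [hall]
    · have hmem : "." ∉ as := by simpa using hdot
      rw [if_neg hdot]
      have hstep2 : (fun (kept : PySem.Set String) (d : String) =>
          if d = "." then kept.add d
          else
            if (!(pvAncestors (pvRstripSlash d.toList)).isdisjoint
                  (PySem.Set.ofList (as.map (fun a => pvRstripSlash a.toList)))) = true
            then kept.add d else kept)
          = (fun kept d => if (d == "." ||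
                !(pvAncestors (pvRstripSlash d.toList)).isdisjoint
                  (PySem.Set.ofList (as.map (fun a => pvRstripSlash a.toList)))) = true
              then PySem.Set.add kept d else kept) := by
        funext kept d
        by_cases hd : d = "." <;> simp [hd]
      rw [hstep2, ← List.foldl_filter, ← PySem.Set.ofList_eq_foldl]
      congr 1
      refine congrArg _ ?_
      apply List.filter_congr
      intro d _
      by_cases hd : d = "."
      · simp [hd]
      · have hd' : (d == ".") = false := by simpa using hd
        simp only [hd', Bool.false_or]
        rw [Bool.eq_iff_iff]
        rw [pvOkLoop_eq_any _ _ hmem, pv_isdisjoint_iff]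
        constructor
        · rintro ⟨a, ha, hx⟩
          refine ⟨pvRstripSlash a.toList, hx, ?_⟩
          rw [PySem.Set.mem_ofList]
          exact List.mem_map_of_mem ha
        · rintro ⟨x, hx, hp⟩
          rw [PySem.Set.mem_ofList, List.mem_map] at hp
          obtain ⟨a, ha, rfl⟩ := hp
          exact ⟨a, ha, hx⟩
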